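-- pv_equiv track=rewrite | github.com/MohiuddinSohel/Leetcoding | amazonOAPreparation/OA.py | min_distance_to_friends_house
-- ===== SOURCE A (Python) =====
-- def min_distance_to_friends_house(arr):
--     result = []
--     prefix_sum = [0] * (len(arr) +1)
--     for i in range(len(arr)):
--         prefix_sum[i + 1] = prefix_sum[i] + arr[i]
--     for i, d in enumerate(arr):
--         l, r = 0, len(arr) - 1
--         if d - arr[0] < arr[-1] - d:
--             r -= 1
--         else:
--             l = 1
--         distance = 0
--         if l < i:
--             distance += (prefix_sum[i + 1] - prefix_sum[l + 1] - arr[l] * (i - l))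
--         if i < r:
--             distance += (prefix_sum[r + 1] - prefix_sum[i + 1] - arr[i] * (r - i))
--         result.append(distance)
--     return result
-- ===== SOURCE B (Python) =====
-- def min_distance_to_friends_house(arr):
--     # No prefix-sum table: for each index, scan the admitted interval directly,
--     # accumulating the pairwise distances term by term (O(n^2) brute force).
--     n = len(arr)
--     result = []
--     for i, d in enumerate(arr):
--         l, r = 0, n - 1
--         if d - arr[0] < arr[-1] - d:
--             r -= 1
--         else:
--             l = 1
--         dist = 0
--         for j in range(l + 1, i + 1):
--             dist += arr[j] - arr[l]
--         for j in range(i + 1, r + 1):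
--             dist += arr[j] - arr[i]
--         result.append(dist)
--     return result
-- ===== Notes on version B (the rewrite author's own statement) =====
-- stated objective: alternative
-- what changed: Dropped A's precomputed prefix-sum table and its O(1) interval-sum lookups; B instead scans the admitted interval directly for each index, summing arr[j]-arr[l] and arr[j]-arr[i] term by term (brute force, O(n^2)).
import Mathlib
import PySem

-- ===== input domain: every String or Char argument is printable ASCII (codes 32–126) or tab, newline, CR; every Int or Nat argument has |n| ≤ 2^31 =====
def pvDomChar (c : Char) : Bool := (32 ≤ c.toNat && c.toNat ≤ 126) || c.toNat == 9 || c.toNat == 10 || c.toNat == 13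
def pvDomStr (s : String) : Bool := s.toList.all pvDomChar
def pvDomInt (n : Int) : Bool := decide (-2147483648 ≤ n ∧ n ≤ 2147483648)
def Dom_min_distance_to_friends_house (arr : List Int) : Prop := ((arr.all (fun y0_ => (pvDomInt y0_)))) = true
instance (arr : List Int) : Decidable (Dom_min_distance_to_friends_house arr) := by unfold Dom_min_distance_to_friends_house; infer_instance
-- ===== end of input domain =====

-- B drops A's prefix-sum table and instead scans the admitted interval directly for
-- each index, summing term by term (objective: alternative; B is O(n^2) vs A's O(n)).

-- ===== PORT A =====
-- prefix_sum building loop; all indices are in range on every iteration, so getD's default is never used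
def pvBuildPrefix (arr : List Int) : List Int :=
  (List.range arr.length).foldl
    (fun ps i => ps.set (i + 1) (ps.getD i 0 + arr.getD i 0))
    (List.replicate (arr.length + 1) 0)

-- the two guarded distance terms of A's loop body, given the chosen l and r
def pvTermsA (arr ps : List Int) (i l r : Int) : Int :=
  (if l < i then
      PySem.List.pyGetD ps (i + 1) 0 - PySem.List.pyGetD ps (l + 1) 0
        - PySem.List.pyGetD arr l 0 * (i - l)
    else 0)
  + (if i < r then
      PySem.List.pyGetD ps (r + 1) 0 - PySem.List.pyGetD ps (i + 1) 0
        - PySem.List.pyGetD arr i 0 * (r - i)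
    else 0)

-- the body of A's second loop for one (i, d) pair (arr[-1] via pyGetD; arr is nonempty whenever this runs)
def pvBodyA (arr ps : List Int) (n : Int) (i d : Int) : Int :=
  if d - arr.getD 0 0 < PySem.List.pyGetD arr (-1) 0 - d then pvTermsA arr ps i 0 (n - 2)
  else pvTermsA arr ps i 1 (n - 1)

def min_distance_to_friends_house (arr : List Int) : List Int :=
  let ps := pvBuildPrefix arr
  (PySem.List.enumerate arr).foldl
    (fun result p => result ++ [pvBodyA arr ps (arr.length : Int) p.1 p.2]) []

-- ===== PORT B =====
-- B's loop body for one (i, d) pair: choose l, r as in the Python, then the two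
-- direct scans 'for j in range(l+1, i+1)' and 'for j in range(i+1, r+1)'
def pvBodyB (arr : List Int) (n : Int) (i d : Int) : Int :=
  let lr : Int × Int :=
    if d - arr.getD 0 0 < PySem.List.pyGetD arr (-1) 0 - d then (0, n - 2) else (1, n - 1)
  let dist1 :=
    (PySem.List.pyRange (lr.1 + 1) (i + 1) 1).foldl
      (fun dist j => dist + (PySem.List.pyGetD arr j 0 - PySem.List.pyGetD arr lr.1 0)) 0
  (PySem.List.pyRange (i + 1) (lr.2 + 1) 1).foldl
    (fun dist j => dist + (PySem.List.pyGetD arr j 0 - PySem.List.pyGetD arr i 0)) dist1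

def min_distance_to_friends_house_alt (arr : List Int) : List Int :=
  (PySem.List.enumerate arr).foldl
    (fun result p => result ++ [pvBodyB arr (arr.length : Int) p.1 p.2]) []

-- ===== PRECONDITION & SPEC =====
def Spec_min_distance_to_friends_house (arr : List Int) (out : List Int) : Prop := out = min_distance_to_friends_house_alt arr
instance (arr : List Int) (out : List Int) : Decidable (Spec_min_distance_to_friends_house arr out) := by unfold Spec_min_distance_to_friends_house; infer_instance

-- ===== CLAIM (what is proved, stated in full; the proofs are below) =====
def Claim_equal_min_distance_to_friends_house : Prop := ∀ (arr : List Int), Dom_min_distance_to_friends_house arr → Spec_min_distance_to_friends_house arr (min_distance_to_friends_house arr)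

-- ===== LEMMAS AND PROOFS =====

-- (arr.take (j+1)).sum = (arr.take j).sum + arr[j]
theorem pv_take_sum_succ (arr : List Int) (j : Nat) (hj : j < arr.length) :
    (arr.take (j + 1)).sum = (arr.take j).sum + arr.getD j 0 := by
  rw [List.take_add_one, List.sum_append, List.getD_eq_getElem?_getD,
    List.getElem?_eq_getElem hj]
  simp

-- characterization of A's prefix-sum table after m iterations
theorem pv_build_loop (arr : List Int) (m : Nat) (hm : m ≤ arr.length) :
    (List.range m).foldl
      (fun ps i => ps.set (i + 1) (ps.getD i 0 + arr.getD i 0))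
      (List.replicate (arr.length + 1) 0)
    = (List.range (arr.length + 1)).map (fun k => if k ≤ m then (arr.take k).sum else 0) := by
  induction m with
  | zero =>
    apply List.ext_getElem
    · simp
    intro k hk1 hk2
    simp only [List.getElem_map, List.getElem_range]
    by_cases h : k = 0
    · simp [h]
    · simp [h]
  | succ m ih =>
    rw [List.range_succ, List.foldl_append, ih (by omega)]
    apply List.ext_getElem
    · simp
    intro k hk1 hk2
    simp at hk1
    have hgm : (((List.range (arr.length + 1)).map
        (fun k => if k ≤ m then (arr.take k).sum else 0)).getD m 0) = (arr.take m).sum := by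
      rw [List.getD_eq_getElem?_getD,
        List.getElem?_eq_getElem (by simp only [List.length_map, List.length_range]; omega)]
      simp
    simp only [List.foldl_cons, List.foldl_nil, hgm]
    rw [List.getElem_set]
    by_cases hk : m + 1 = k
    · subst hk
      simp [pv_take_sum_succ arr m (by omega)]
    · simp only [if_neg hk, List.getElem_map, List.getElem_range]
      exact if_congr (by omega) rfl rfl

theorem pv_psGet (arr : List Int) (k : Nat) (hk : k ≤ arr.length) :
    (pvBuildPrefix arr).getD k 0 = (arr.take k).sum := by
  unfold pvBuildPrefix
  rw [pv_build_loop arr arr.length (le_refl _)]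
  rw [List.getD_eq_getElem?_getD, List.getElem?_eq_getElem (by simp; omega)]
  simp [hk]

theorem pv_psGetI (arr : List Int) (m : Nat) (hm : m ≤ arr.length) :
    PySem.List.pyGetD (pvBuildPrefix arr) ((m : Nat) : Int) 0 = (arr.take m).sum := by
  rw [PySem.List.pyGetD_natCast]; exact pv_psGet arr m hm

-- the value of one of B's scans, as a prefix-sum difference
theorem pv_sum_range (arr : List Int) (c : Int) :
    ∀ (b a : Nat), a ≤ b → b ≤ arr.length →
      ((PySem.List.pyRange (a : Int) (b : Int) 1).map
        (fun j => PySem.List.pyGetD arr j 0 - c)).sum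
      = (arr.take b).sum - (arr.take a).sum - c * ((b : Int) - (a : Int)) := by
  intro b
  induction b with
  | zero =>
    intro a ha _
    interval_cases a
    simp [PySem.List.pyRange_one_eq_nil]
  | succ b ih =>
    intro a ha hb
    by_cases hab : a = b + 1
    · subst hab
      simp [PySem.List.pyRange_one_eq_nil]
    · have ha' : a ≤ b := by omega
      rw [show ((b + 1 : Nat) : Int) = (b : Int) + 1 by push_cast; ring,
        PySem.List.pyRange_one_succ_right (by exact_mod_cast ha'),
        List.map_append, List.sum_append, ih a ha' (by omega)]
      simp only [List.map_cons, List.map_nil, List.sum_cons, List.sum_nil,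
        PySem.List.pyGetD_natCast]
      rw [pv_take_sum_succ arr b (by omega)]
      ring

-- one guarded scan of B as A's guarded prefix-sum term
theorem pv_term_eq (arr : List Int) (c : Int) (a b : Nat) (hb : b ≤ arr.length) (s : Int) :
    (PySem.List.pyRange (a : Int) (b : Int) 1).foldl
      (fun dist j => dist + (PySem.List.pyGetD arr j 0 - c)) s
    = s + (if (a : Int) < b then
        (arr.take b).sum - (arr.take a).sum - c * ((b : Int) - (a : Int))
      else 0) := by
  rw [PySem.List.foldl_add]
  by_cases h : (a : Int) < b
  · rw [if_pos h, pv_sum_range arr c b a (by exact_mod_cast h.le) hb]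
  · rw [if_neg h, PySem.List.pyRange_one_eq_nil (by omega)]
    simp

-- pointwise equality of the two loop bodies at index k
theorem pv_body_eq (arr : List Int) (k : Nat) (hk : k < arr.length) (d : Int) :
    pvBodyA arr (pvBuildPrefix arr) (arr.length : Int) (k : Int) d
    = pvBodyB arr (arr.length : Int) (k : Int) d := by
  have hlen : 1 ≤ arr.length := by omega
  unfold pvBodyA pvBodyB pvTermsA
  by_cases hc : d - arr.getD 0 0 < PySem.List.pyGetD arr (-1) 0 - d
  · -- l = 0, r = n - 2
    rw [if_pos hc, if_pos hc]
    simp only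
    rw [show ((0 : Int) + 1) = ((1 : Nat) : Int) by norm_num,
      show ((k : Int) + 1) = ((k + 1 : Nat) : Int) by push_cast; ring,
      show ((arr.length : Int) - 2 + 1) = ((arr.length - 1 : Nat) : Int) by omega,
      pv_term_eq arr _ (k + 1) (arr.length - 1) (by omega),
      pv_term_eq arr _ 1 (k + 1) (by omega), zero_add,
      pv_psGetI arr (k + 1) (by omega), pv_psGetI arr 1 hlen,
      pv_psGetI arr (arr.length - 1) (by omega),
      show ((arr.length - 1 : Nat) : Int) = (arr.length : Int) - 1 by omega,
      show ((k + 1 : Nat) : Int) = (k : Int) + 1 by push_cast; ring,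
      show ((1 : Nat) : Int) = (1 : Int) by norm_num]
    split_ifs <;> (try (exfalso; omega)) <;> ring
  · -- l = 1, r = n - 1
    rw [if_neg hc, if_neg hc]
    simp only
    rw [show ((1 : Int) + 1) = ((2 : Nat) : Int) by norm_num,
      show ((k : Int) + 1) = ((k + 1 : Nat) : Int) by push_cast; ring,
      show ((arr.length : Int) - 1 + 1) = ((arr.length : Nat) : Int) by ring,
      pv_term_eq arr _ (k + 1) arr.length (le_refl _),
      pv_term_eq arr _ 2 (k + 1) (by omega), zero_add]
    by_cases h2le : 2 ≤ arr.length
    · rw [pv_psGetI arr (k + 1) (by omega), pv_psGetI arr 2 h2le,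
        pv_psGetI arr arr.length (le_refl _),
        show ((k + 1 : Nat) : Int) = (k : Int) + 1 by push_cast; ring,
        show ((2 : Nat) : Int) = (2 : Int) by norm_num]
      split_ifs <;> (try (exfalso; omega)) <;> ring
    · split_ifs <;> first | (exfalso; omega) | ring

-- ===== VERDICT (by name: the statement is the Claim_ definition above) =====
theorem min_distance_to_friends_house_spec : Claim_equal_min_distance_to_friends_house := by
  intro arr _
  unfold Spec_min_distance_to_friends_house min_distance_to_friends_house
    min_distance_to_friends_house_alt
  rw [PySem.List.foldl_append_singleton_eq_map, PySem.List.foldl_append_singleton_eq_map]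
  simp only [List.nil_append]
  apply List.map_congr_left
  intro p hp
  rw [PySem.List.mem_enumerate_iff] at hp
  obtain ⟨k, hk, rfl⟩ := hp
  simp only [zero_add]
  exact pv_body_eq arr k hk _
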